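-- pv_equiv track=rewrite | github.com/TI-for-Coding/PS | DH/프로그래머스_코딩테스트 고득점 Kit/TrainingSuit(P42862,Case1).py | approx_contains
-- ===== SOURCE A (Python) =====
-- def approx_contains(list, n) :
--
--     result = 0
--
--     for l in list :
--
--         if l == (n - 1) :
--             result = -1
--             break
--         elif l == (n + 1) :
--             result = 1
--             break
--
--     return result
-- ===== SOURCE B (Python) =====
-- def approx_contains(list, n):
--     L = len(list)
--     i = list.index(n - 1) if (n - 1) in list else L
--     j = list.index(n + 1) if (n + 1) in list else L
--     if i < j:
--         return -1
--     if j < i: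
--         return 1
--     return 0
-- ===== Notes on version B (the rewrite author's own statement) =====
-- stated objective: alternative
-- what changed: Instead of one early-breaking scan, B locates the first occurrence of n-1 and of n+1 separately (missing maps to len(list)) and compares the two indices; since no element equals both, this preserves first-match order.
import Mathlib
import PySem

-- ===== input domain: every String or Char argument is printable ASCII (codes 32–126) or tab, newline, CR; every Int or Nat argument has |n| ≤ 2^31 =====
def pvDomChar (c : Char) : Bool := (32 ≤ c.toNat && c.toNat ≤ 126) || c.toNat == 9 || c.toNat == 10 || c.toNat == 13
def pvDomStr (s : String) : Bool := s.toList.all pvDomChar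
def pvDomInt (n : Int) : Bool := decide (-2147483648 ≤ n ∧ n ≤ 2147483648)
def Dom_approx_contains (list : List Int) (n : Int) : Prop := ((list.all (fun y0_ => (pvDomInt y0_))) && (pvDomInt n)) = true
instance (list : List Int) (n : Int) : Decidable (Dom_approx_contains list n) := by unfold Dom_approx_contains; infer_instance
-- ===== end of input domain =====

-- B replaces A's single early-breaking scan by two separate first-occurrence lookups whose indices are compared (alternative decomposition, same cost).


-- ===== PORT A =====
-- loop with break, transliterated as structural recursion: first element equal to n-1 gives -1, equal to n+1 gives 1, else 0
def approx_contains (list : List Int) (n : Int) : Int :=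
  match list with
  | [] => 0
  | l :: rest =>
      if l = n - 1 then -1
      else if l = n + 1 then 1
      else approx_contains rest n

-- ===== PORT B =====
-- 'x in list' then 'list.index(x)', missing mapped to len(list)
def pyIndexOrLen (list : List Int) (x : Int) : Nat :=
  match PySem.List.index? list x with
  | some i => i
  | none => list.length

def approx_contains_alt (list : List Int) (n : Int) : Int :=
  let i := pyIndexOrLen list (n - 1)
  let j := pyIndexOrLen list (n + 1)
  if i < j then -1
  else if j < i then 1
  else 0

-- ===== PRECONDITION & SPEC =====
def Spec_approx_contains (list : List Int) (n : Int) (out : Int) : Prop := out = approx_contains_alt list n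
instance (list : List Int) (n : Int) (out : Int) : Decidable (Spec_approx_contains list n out) := by unfold Spec_approx_contains; infer_instance

-- ===== CLAIM (what is proved, stated in full; the proofs are below) =====
def Claim_equal_approx_contains : Prop := ∀ (list : List Int) (n : Int), Dom_approx_contains list n → Spec_approx_contains list n (approx_contains list n)

-- ===== LEMMAS AND PROOFS =====
theorem pyIndexOrLen_cons_self (xs : List Int) (x : Int) : pyIndexOrLen (x :: xs) x = 0 := by
  unfold pyIndexOrLen
  rw [PySem.List.index?_cons_self]

theorem pyIndexOrLen_cons_ne (xs : List Int) (x v : Int) (h : x ≠ v) :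
    pyIndexOrLen (x :: xs) v = pyIndexOrLen xs v + 1 := by
  unfold pyIndexOrLen
  rw [PySem.List.index?_cons_of_ne _ h]
  cases PySem.List.index? xs v <;> simp

theorem approx_contains_eq (list : List Int) (n : Int) :
    approx_contains list n = approx_contains_alt list n := by
  induction list with
  | nil => simp [approx_contains, approx_contains_alt, pyIndexOrLen, PySem.List.index?]
  | cons l rest ih =>
    by_cases h1 : l = n - 1
    · subst h1
      have hne : n - 1 ≠ n + 1 := by omega
      simp [approx_contains, approx_contains_alt, pyIndexOrLen_cons_self,
        pyIndexOrLen_cons_ne rest _ _ hne]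
    · by_cases h2 : l = n + 1
      · subst h2
        have hne : n + 1 ≠ n - 1 := by omega
        have hne2 : ¬ (n + 1 = n - 1) := by omega
        simp [approx_contains, approx_contains_alt, pyIndexOrLen_cons_self,
          pyIndexOrLen_cons_ne rest _ _ hne, hne2]
      · rw [show approx_contains (l :: rest) n = approx_contains rest n by
          simp [approx_contains, h1, h2]]
        rw [ih]
        simp only [approx_contains_alt, pyIndexOrLen_cons_ne _ _ _ h1,
          pyIndexOrLen_cons_ne _ _ _ h2]
        split_ifs <;> omega

-- ===== VERDICT (by name: the statement is the Claim_ definition above) =====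
theorem approx_contains_spec : Claim_equal_approx_contains := by
  intro list n _
  unfold Spec_approx_contains
  exact approx_contains_eq list n
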